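-- pv_equiv track=rewrite | github.com/zfifteen/prime-gap-structure | benchmarks/python/predictor/simple_pgs_solution_11_carrier_threat_margin_probe.py | pick_last_visible_open_before_threat
-- ===== SOURCE A (Python) =====
-- def pick_last_visible_open_before_threat(
--     visible_open: list[int],
--     threat_n: int | None,
-- ) -> int | None:
--     """Return last visible-open candidate strictly before threat_n."""
--     if threat_n is None:
--         return None
--     before = [candidate for candidate in visible_open if int(candidate) < int(threat_n)]
--     return int(before[-1]) if before else None
-- ===== SOURCE B (Python) =====
-- def pick_last_visible_open_before_threat(
--     visible_open: list[int],
--     threat_n: int | None,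
-- ) -> int | None:
--     """Return last visible-open candidate strictly before threat_n."""
--     if threat_n is None:
--         return None
--     for candidate in reversed(visible_open):
--         if int(candidate) < int(threat_n):
--             return int(candidate)
--     return None
-- ===== Notes on version B (the rewrite author's own statement) =====
-- stated objective: simpler
-- what changed: Replaces building the full filtered list and indexing its last element with a single early-terminating scan over the reversed list that returns the first candidate below threat_n.
import Mathlib
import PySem

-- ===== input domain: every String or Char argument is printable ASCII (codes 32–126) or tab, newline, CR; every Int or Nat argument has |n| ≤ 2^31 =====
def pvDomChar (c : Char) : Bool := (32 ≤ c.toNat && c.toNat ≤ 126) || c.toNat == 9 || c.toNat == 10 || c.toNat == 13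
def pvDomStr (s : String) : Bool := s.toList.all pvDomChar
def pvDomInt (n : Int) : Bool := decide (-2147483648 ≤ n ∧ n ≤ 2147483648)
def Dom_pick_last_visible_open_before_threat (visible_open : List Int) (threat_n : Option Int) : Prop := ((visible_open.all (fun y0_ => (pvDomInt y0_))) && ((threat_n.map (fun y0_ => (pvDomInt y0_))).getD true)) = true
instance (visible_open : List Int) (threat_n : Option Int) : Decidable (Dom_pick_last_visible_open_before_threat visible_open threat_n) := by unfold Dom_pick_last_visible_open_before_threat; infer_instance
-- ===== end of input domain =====

-- B replaces A's full filtered-list construction + last-indexing by an early-terminating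
-- scan of the reversed list (objective: simpler decomposition; same asymptotic cost).


-- ===== PORT A =====
-- A: build the filtered list `before`, then return before[-1] if nonempty else None.
def pick_last_visible_open_before_threat (visible_open : List Int) (threat_n : Option Int) : Option Int :=
  match threat_n with
  | none => none
  | some t =>
    let before := visible_open.filter (fun candidate => decide (candidate < t))
    if before.isEmpty then none else PySem.List.pyGet? before (-1)

-- ===== PORT B =====
-- B: scan the reversed list, returning the first candidate strictly below t.
def pvAltLoop (t : Int) : List Int → Option Int
  | [] => none
  | candidate :: rest => if candidate < t then some candidate else pvAltLoop t rest

def pick_last_visible_open_before_threat_alt (visible_open : List Int) (threat_n : Option Int) : Option Int :=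
  match threat_n with
  | none => none
  | some t => pvAltLoop t visible_open.reverse

-- ===== PRECONDITION & SPEC =====
def Spec_pick_last_visible_open_before_threat (visible_open : List Int) (threat_n : Option Int) (out : Option Int) : Prop := out = pick_last_visible_open_before_threat_alt visible_open threat_n
instance (visible_open : List Int) (threat_n : Option Int) (out : Option Int) : Decidable (Spec_pick_last_visible_open_before_threat visible_open threat_n out) := by unfold Spec_pick_last_visible_open_before_threat; infer_instance

-- ===== CLAIM (what is proved, stated in full; the proofs are below) =====
def Claim_equal_pick_last_visible_open_before_threat : Prop := ∀ (visible_open : List Int) (threat_n : Option Int), Dom_pick_last_visible_open_before_threat visible_open threat_n → Spec_pick_last_visible_open_before_threat visible_open threat_n (pick_last_visible_open_before_threat visible_open threat_n)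

-- ===== LEMMAS AND PROOFS =====
theorem pvMain (t : Int) (l : List Int) :
    (let before := l.filter (fun candidate => decide (candidate < t));
     if before.isEmpty then none else PySem.List.pyGet? before (-1)) = pvAltLoop t l.reverse := by
  induction l using List.reverseRecOn with
  | nil => simp [pvAltLoop]
  | append_singleton l a ih =>
    simp only [List.filter_append, List.reverse_append, List.reverse_singleton,
      List.singleton_append, pvAltLoop]
    by_cases h : a < t
    · simp [h, PySem.List.pyGet?, PySem.List.pyIdx?]
    · simpa [h] using ih

-- ===== VERDICT (by name: the statement is the Claim_ definition above) =====
theorem pick_last_visible_open_before_threat_spec : Claim_equal_pick_last_visible_open_before_threat := by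
  intro visible_open threat_n _
  unfold Spec_pick_last_visible_open_before_threat pick_last_visible_open_before_threat
    pick_last_visible_open_before_threat_alt
  cases threat_n with
  | none => rfl
  | some t => exact pvMain t visible_open
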